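-- pv_equiv track=rewrite | github.com/c-kk/aoc | 2020/day23/backup/game.py | solution_string
-- ===== SOURCE A (Python) =====
-- def solution_string(arrangement):
-- 	solution = ''
-- 	one_index = arrangement.index(1)
-- 	length = len(arrangement)
-- 	for i in range(1, length):
-- 		index = (one_index + i) % length
-- 		number = arrangement[index]
-- 		solution += str(number)
-- 	return solution
-- ===== SOURCE B (Python) =====
-- def solution_string(arrangement):
-- 	i = arrangement.index(1)
-- 	rotated = arrangement[i + 1:] + arrangement[:i]
-- 	return ''.join(map(str, rotated))
-- ===== Notes on version B (the rewrite author's own statement) =====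
-- stated objective: simpler
-- what changed: Replaces the per-index loop with modular arithmetic by two slices around the position of 1 concatenated and joined in one expression.
import Mathlib
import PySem

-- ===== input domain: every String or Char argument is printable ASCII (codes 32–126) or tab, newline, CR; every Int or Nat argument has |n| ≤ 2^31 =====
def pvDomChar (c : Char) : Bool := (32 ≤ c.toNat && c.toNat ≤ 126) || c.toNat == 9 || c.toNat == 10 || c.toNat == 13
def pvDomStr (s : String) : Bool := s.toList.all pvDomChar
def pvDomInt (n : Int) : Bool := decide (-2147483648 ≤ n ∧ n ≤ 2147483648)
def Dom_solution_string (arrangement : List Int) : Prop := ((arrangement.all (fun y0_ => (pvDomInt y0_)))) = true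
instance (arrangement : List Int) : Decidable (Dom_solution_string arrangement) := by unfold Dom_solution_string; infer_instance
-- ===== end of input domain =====

-- B builds the rotation after the cup 1 by two slices and a join instead of A's
-- per-index loop with modular arithmetic; objective: simpler.

-- ===== PORT A =====
def solution_string (arrangement : List Int) : String :=
  match PySem.List.index? arrangement 1 with
  | none => ""   -- Python raises ValueError here; excluded by Pre_
  | some one_index =>
      let length : Int := arrangement.length
      (PySem.List.pyRange 1 length 1).foldl
        (fun solution i =>
          let index := PySem.Int.mod ((one_index : Int) + i) length
          let number := PySem.List.pyGetD arrangement index 0   -- in range under Pre_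
          solution ++ PySem.Int.toStr number) ""

-- ===== PORT B =====
def solution_string_alt (arrangement : List Int) : String :=
  match PySem.List.index? arrangement 1 with
  | none => ""   -- Python raises ValueError here; excluded by Pre_
  | some i =>
      let rotated := PySem.List.slice arrangement (some ((i : Int) + 1)) none
                   ++ PySem.List.slice arrangement none (some (i : Int))
      PySem.Str.join "" (rotated.map PySem.Int.toStr)

-- ===== PRECONDITION & SPEC =====
-- Pre_ excludes exactly the inputs without the cup 1, on which Python's list.index raises ValueError.
def Pre_solution_string (arrangement : List Int) : Prop := (1 : Int) ∈ arrangement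
instance (arrangement : List Int) : Decidable (Pre_solution_string arrangement) := by
  unfold Pre_solution_string; infer_instance

def pvWitness_solution_string : List Int := [3, 8, 9, 1, 2, 5, 4, 6, 7]

def Spec_solution_string (arrangement : List Int) (out : String) : Prop := out = solution_string_alt arrangement
instance (arrangement : List Int) (out : String) : Decidable (Spec_solution_string arrangement out) := by unfold Spec_solution_string; infer_instance

-- ===== CLAIM (what is proved, stated in full; the proofs are below) =====
def Claim_equal_solution_string : Prop := ∀ (arrangement : List Int), Dom_solution_string arrangement → Pre_solution_string arrangement → Spec_solution_string arrangement (solution_string arrangement)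

-- ===== LEMMAS AND PROOFS =====

-- ''.join distributes over cons.
theorem join_empty_cons (x : String) (xs : List String) :
    PySem.Str.join "" (x :: xs) = x ++ PySem.Str.join "" xs := by
  apply String.toList_inj.mp
  cases xs with
  | nil => simp [PySem.Str.toList_join, PySem.Chars.join, List.intercalate]
  | cons y ys =>
      simp [PySem.Str.toList_join, PySem.Chars.join, List.intercalate]

-- A foldl that appends g of each element equals acc ++ ''.join of the mapped list.
theorem foldl_str_append_eq_join (g : Int → String) :
    ∀ (L : List Int) (acc : String),
      L.foldl (fun s i => s ++ g i) acc = acc ++ PySem.Str.join "" (L.map g) := by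
  intro L
  induction L with
  | nil =>
      intro acc
      apply String.toList_inj.mp
      simp [PySem.Str.toList_join, PySem.Chars.join_nil]
  | cons x xs ih =>
      intro acc
      simp only [List.foldl_cons, List.map_cons, ih, join_empty_cons]
      apply String.toList_inj.mp
      simp

-- The list of cups A visits (indices (k+i) % n for i = 1 … n-1) is exactly the rotation.
theorem map_mod_eq_rotate (arr : List Int) (k : Nat) (hk : k < arr.length) :
    (PySem.List.pyRange 1 (arr.length : Int) 1).map
      (fun i => PySem.List.pyGetD arr (PySem.Int.mod ((k : Int) + i) (arr.length : Int)) 0)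
    = arr.drop (k + 1) ++ arr.take k := by
  set n := arr.length with hn
  apply List.ext_getElem
  · simp [PySem.List.length_pyRange_one]
    omega
  · intro j hj1 hj2
    have hjlt : j < n - 1 := by
      simpa [PySem.List.length_pyRange_one] using hj1
    rw [List.getElem_map, PySem.List.getElem_pyRange_one]
    have hmodval : PySem.Int.mod ((k : Int) + (1 + (j : Int))) (n : Int)
        = if j < n - 1 - k then ((k + 1 + j : Nat) : Int) else ((j - (n - 1 - k) : Nat) : Int) := by
      unfold PySem.Int.mod
      rw [Int.fmod_eq_emod, if_pos (Or.inl (by positivity)), add_zero]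
      split
      · rename_i h
        rw [Int.emod_eq_of_lt (by omega) (by push_cast; omega)]
        omega
      · rename_i h
        have heq : (k : Int) + (1 + (j : Int)) = ((j - (n - 1 - k) : Nat) : Int) + (n : Int) * 1 := by
          omega
        rw [heq, Int.add_mul_emod_self_left,
          Int.emod_eq_of_lt (by omega) (by omega)]
    rw [hmodval]
    split
    · rename_i h
      rw [PySem.List.pyGetD_eq_getElem arr 0 (by omega) (by push_cast; omega)]
      rw [List.getElem_append_left (by simp [List.length_drop]; omega)]
      rw [List.getElem_drop]
      congr 1
    · rename_i h
      rw [PySem.List.pyGetD_eq_getElem arr 0 (by omega) (by omega)]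
      rw [List.getElem_append_right (by simp [List.length_drop]; omega)]
      rw [List.getElem_take]
      congr 1
      simp only [List.length_drop]
      omega

-- ===== VERDICT (by name: the statement is the Claim_ definition above) =====
theorem solution_string_spec : Claim_equal_solution_string := by
  intro arr _ hpre
  unfold Spec_solution_string solution_string solution_string_alt
  have hmem : (1 : Int) ∈ arr := hpre
  obtain ⟨k, hk⟩ := Option.isSome_iff_exists.mp ((PySem.List.index?_isSome_iff arr 1).mpr hmem)
  rw [hk]
  obtain ⟨hklt, -, -⟩ := PySem.List.getElem_of_index?_eq_some hk
  simp only
  rw [foldl_str_append_eq_join]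
  have hslice1 : PySem.List.slice arr (some ((k : Int) + 1)) none = arr.drop (k + 1) := by
    have : ((k : Int) + 1) = ((k + 1 : Nat) : Int) := by push_cast; ring
    rw [this, PySem.List.slice_from_natCast]
  have hslice2 : PySem.List.slice arr none (some (k : Int)) = arr.take k := by
    rw [PySem.List.slice_to_natCast]
  rw [hslice1, hslice2, ← map_mod_eq_rotate arr k hklt]
  simp only [List.map_map]
  apply String.toList_inj.mp
  simp [Function.comp_def]
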